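-- pv_equiv track=rewrite | github.com/chho33/TY | utils.py | groups_link_list_generator
-- ===== SOURCE A (Python) =====
-- def groups_link_list_generator(groups_filled):
--     link_list = []
--     for group in groups_filled:
--         g_start,g_end,category = group
--         category = int(category)
--         time_sequence = list(range(g_start,g_end+1))
--         for t in time_sequence:
--             # position_type: which position type current time index belong to ==> 0:start; 1:middle; -1:end;
--             position_type = 0 if t == g_start else -1 if t == g_end else 1
--             # (position_type, end of group, category)
--             data = (position_type,g_end,category)
--             link_list.append(data)
--     return link_list
-- ===== SOURCE B (Python) =====
-- def groups_link_list_generator(groups_filled):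
--     out = []
--     for g_start, g_end, category in groups_filled:
--         category = int(category)
--         n = g_end - g_start + 1
--         if n > 0:
--             block = [(1, g_end, category)] * n
--             block[-1] = (-1, g_end, category)
--             block[0] = (0, g_end, category)
--             out += block
--     return out
-- ===== Notes on version B (the rewrite author's own statement) =====
-- stated objective: faster
-- what changed: Instead of iterating every timestep and classifying each by comparisons against the endpoints, B makes one uniform replicated block of middle tuples per group and then patches its last and first slots to the end and start markers (last first, so a length-1 group ends as the start marker); replication avoids per-step branching and appends.
import Mathlib
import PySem

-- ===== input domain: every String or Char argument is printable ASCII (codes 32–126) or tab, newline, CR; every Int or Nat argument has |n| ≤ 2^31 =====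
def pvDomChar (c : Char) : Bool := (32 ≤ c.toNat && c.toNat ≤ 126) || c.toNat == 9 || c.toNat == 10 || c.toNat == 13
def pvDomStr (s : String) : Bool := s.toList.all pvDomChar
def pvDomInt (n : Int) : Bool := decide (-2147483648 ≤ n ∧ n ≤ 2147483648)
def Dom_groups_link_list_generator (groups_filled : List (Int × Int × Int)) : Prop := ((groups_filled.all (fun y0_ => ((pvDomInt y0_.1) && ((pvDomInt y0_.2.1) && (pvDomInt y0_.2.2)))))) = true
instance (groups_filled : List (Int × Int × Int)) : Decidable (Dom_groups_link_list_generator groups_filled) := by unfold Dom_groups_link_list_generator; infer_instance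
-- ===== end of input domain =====

-- B replaces A's per-timestep classification loop with a build-then-patch scheme: one uniform
-- replicated block of middle tuples per group, whose last and first slots are then overwritten
-- with the end and start markers (last first, so a length-1 group keeps the start marker).

-- ===== PORT A =====
def groups_link_list_generator (groups_filled : List (Int × Int × Int)) : List (Int × Int × Int) :=
  groups_filled.foldl (fun link_list group =>
    let g_start := group.1
    let g_end := group.2.1
    let category := group.2.2
    let time_sequence := PySem.List.pyRange g_start (g_end + 1) 1
    time_sequence.foldl (fun acc t =>
      let position_type : Int := if t = g_start then 0 else if t = g_end then -1 else 1
      acc ++ [(position_type, g_end, category)]) link_list) []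

-- ===== PORT B =====
def groups_link_list_generator_alt (groups_filled : List (Int × Int × Int)) : List (Int × Int × Int) :=
  groups_filled.foldl (fun out group =>
    let g_end := group.2.1
    let category := group.2.2
    let n := g_end - group.1 + 1
    if 0 < n then
      -- block = [(1, g_end, category)] * n; block[-1] = end marker; block[0] = start marker
      let block := List.replicate n.toNat (1, g_end, category)
      let block := block.set (block.length - 1) (-1, g_end, category)
      let block := block.set 0 (0, g_end, category)
      out ++ block
    else out) []

-- ===== PRECONDITION & SPEC =====
def Spec_groups_link_list_generator (groups_filled : List (Int × Int × Int)) (out : List (Int × Int × Int)) : Prop := out = groups_link_list_generator_alt groups_filled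
instance (groups_filled : List (Int × Int × Int)) (out : List (Int × Int × Int)) : Decidable (Spec_groups_link_list_generator groups_filled out) := by unfold Spec_groups_link_list_generator; infer_instance

-- ===== CLAIM (what is proved, stated in full; the proofs are below) =====
def Claim_equal_groups_link_list_generator : Prop := ∀ (groups_filled : List (Int × Int × Int)), Dom_groups_link_list_generator groups_filled → Spec_groups_link_list_generator groups_filled (groups_link_list_generator groups_filled)

-- ===== LEMMAS AND PROOFS =====

-- overwriting the last slot of a replicated list
theorem pvSetLastReplicate {α : Type} (k : Nat) (x y : α) :
    (List.replicate (k + 1) x).set k y = List.replicate k x ++ [y] := by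
  induction k with
  | zero => rfl
  | succ k ih =>
    rw [List.replicate_succ, List.set_cons_succ, ih, List.replicate_succ, List.cons_append]

-- per-group characterisation: A's per-timestep map over the range equals B's patched block
theorem pvGroupPatch (s e c : Int) :
    (PySem.List.pyRange s (e + 1) 1).map
      (fun t => ((if t = s then (0 : Int) else if t = e then -1 else 1), e, c)) =
    (if 0 < e - s + 1 then
      ((List.replicate (e - s + 1).toNat ((1 : Int), e, c)).set
          ((List.replicate (e - s + 1).toNat ((1 : Int), e, c)).length - 1) (-1, e, c)).set
        0 (0, e, c)
     else []) := by
  rcases lt_trichotomy e s with h | h | h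
  · rw [PySem.List.pyRange_one_eq_nil (by omega), if_neg (by omega)]
    rfl
  · subst h
    rw [PySem.List.pyRange_one_singleton, if_pos (by omega)]
    simp
  · rw [if_pos (by omega)]
    -- shape of the patched block for n ≥ 2
    have hn : (e - s + 1).toNat = (e - s - 1).toNat + 1 + 1 := by omega
    rw [hn, List.length_replicate]
    have hlast : (e - s - 1).toNat + 1 + 1 - 1 = (e - s - 1).toNat + 1 := by omega
    rw [hlast, pvSetLastReplicate, List.replicate_succ]
    simp only [List.cons_append, List.set_cons_zero]
    -- shape of A's mapped range
    rw [PySem.List.pyRange_one_cons (by omega),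
        PySem.List.pyRange_one_succ_right (by omega)]
    have hne : s ≠ e := ne_of_lt h
    simp only [List.map_cons, List.map_append, List.map_nil,
      if_neg hne, if_neg hne.symm]
    congr 2
    have hmem : ∀ p ∈ (PySem.List.pyRange (s + 1) e 1).map
        (fun t => ((if t = s then (0 : Int) else if t = e then -1 else 1), e, c)),
        p = ((1 : Int), e, c) := by
      intro p hp
      rcases List.mem_map.mp hp with ⟨t, ht, rfl⟩
      have := (PySem.List.mem_pyRange_one).mp ht
      rw [if_neg (by omega), if_neg (by omega)]
    have := List.eq_replicate_of_mem hmem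
    rw [this, List.length_map, PySem.List.length_pyRange_one]
    congr 1
    omega

theorem groups_link_list_eq (groups_filled : List (Int × Int × Int)) :
    groups_link_list_generator groups_filled = groups_link_list_generator_alt groups_filled := by
  unfold groups_link_list_generator groups_link_list_generator_alt
  induction groups_filled using List.reverseRecOn with
  | nil => rfl
  | append_singleton gs g ih =>
    simp only [List.foldl_append, List.foldl_cons, List.foldl_nil, ih]
    rw [PySem.List.foldl_append_singleton_eq_map, pvGroupPatch]
    split_ifs with h1
    · rfl
    · simp

-- ===== VERDICT (by name: the statement is the Claim_ definition above) =====
theorem groups_link_list_generator_spec : Claim_equal_groups_link_list_generator := by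
  intro gs _
  exact groups_link_list_eq gs
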